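-- pv_equiv track=rewrite | github.com/zhmu/x86box | test/alu.py | my_shl
-- ===== SOURCE A (Python) =====
-- CF = (1 << 0)
--
-- PF = (1 << 2)
--
-- ZF = (1 << 6)
--
-- SF = (1 << 7)
--
-- OF = (1 << 11)
--
-- def must_set_zf(v):
--     return v == 0
--
-- def must_set_sf(v):
--     return (v & 0x80) != 0
--
-- def must_set_pf(v):
--     num_1 = 0
--     for n in range(0, 8):
--         if (v & (1 << n)): num_1 += 1
--     return (num_1 & 1) == 0
--
-- def set_flag(fl, on, flag):
--     if on:
--         fl = fl | flag
--     else: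
--         fl = fl & ~flag
--     return fl
--
-- def set_flags_pzs(v, fl):
--     fl = set_flag(fl, must_set_zf(v), ZF)
--     fl = set_flag(fl, must_set_sf(v), SF)
--     fl = set_flag(fl, must_set_pf(v), PF)
--     return fl
--
-- def my_shl(a, cnt, initial_flags):
--     cnt = cnt & 0x1f
--     if cnt == 0:
--         return (a, initial_flags)
--
--     new_fl = initial_flags & ~CF
--
--     res = a
--     for _ in range(0, cnt):
--         new_fl = set_flag(new_fl, res & 0x80, CF)
--         res = (res << 1) & 0xff
--
--     # OF is undefined if count > 1
--     cf = 0x80 if (new_fl & CF) else 0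
--     new_fl = set_flag(new_fl, (res & 0x80) ^ cf, OF)
--     new_fl = set_flags_pzs(res, new_fl)
--     return (res, new_fl)
-- ===== SOURCE B (Python) =====
-- CF = (1 << 0)
-- PF = (1 << 2)
-- ZF = (1 << 6)
-- SF = (1 << 7)
-- OF = (1 << 11)
--
-- def must_set_zf(v):
--     return v == 0
--
-- def must_set_sf(v):
--     return (v & 0x80) != 0
--
-- def must_set_pf(v):
--     num_1 = 0
--     for n in range(0, 8):
--         if (v & (1 << n)): num_1 += 1
--     return (num_1 & 1) == 0
--
-- def set_flag(fl, on, flag):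
--     if on:
--         fl = fl | flag
--     else:
--         fl = fl & ~flag
--     return fl
--
-- def set_flags_pzs(v, fl):
--     fl = set_flag(fl, must_set_zf(v), ZF)
--     fl = set_flag(fl, must_set_sf(v), SF)
--     fl = set_flag(fl, must_set_pf(v), PF)
--     return fl
--
-- def my_shl(a, cnt, initial_flags):
--     cnt = cnt & 0x1f
--     if cnt == 0:
--         return (a, initial_flags)
--     # closed form: no shifting loop
--     res = (a << cnt) & 0xff
--     cf = (a >> (8 - cnt)) & 1 if cnt <= 8 else 0
--     new_fl = set_flag(initial_flags & ~CF, cf, CF)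
--     new_fl = set_flag(new_fl, (res & 0x80) ^ (0x80 if cf else 0), OF)
--     new_fl = set_flags_pzs(res, new_fl)
--     return (res, new_fl)
-- ===== Notes on version B (the rewrite author's own statement) =====
-- stated objective: simpler
-- what changed: Replaced A's cnt-iteration shift loop (which shifts one bit at a time and re-sets CF every iteration) by a closed form: res = (a << cnt) & 0xff and CF read directly as bit (8 - cnt) of a (0 once cnt >= 9); flag assembly is unchanged.
import Mathlib
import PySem

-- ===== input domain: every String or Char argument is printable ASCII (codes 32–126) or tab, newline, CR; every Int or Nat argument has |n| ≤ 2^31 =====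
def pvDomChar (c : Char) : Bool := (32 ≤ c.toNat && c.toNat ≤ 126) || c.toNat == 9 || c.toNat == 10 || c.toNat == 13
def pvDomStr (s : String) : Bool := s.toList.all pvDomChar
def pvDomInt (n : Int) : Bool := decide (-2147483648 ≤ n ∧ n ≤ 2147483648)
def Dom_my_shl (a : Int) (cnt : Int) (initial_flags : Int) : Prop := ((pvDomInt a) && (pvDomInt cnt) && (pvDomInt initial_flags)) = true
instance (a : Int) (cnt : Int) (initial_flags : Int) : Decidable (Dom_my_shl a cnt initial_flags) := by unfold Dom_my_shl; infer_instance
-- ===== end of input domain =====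

-- B replaces A's per-bit shifting loop by the closed form res = (a << cnt) & 0xff with
-- CF read directly as bit (8 - cnt) of a (0 once cnt ≥ 9); same flag helpers, same results.

-- ===== PORT A =====
-- module constants
def pvCF : Int := 1
def pvPF : Int := 4
def pvZF : Int := 64
def pvSF : Int := 128
def pvOF : Int := 2048

def pvMustSetZF (v : Int) : Bool := decide (v = 0)

def pvMustSetSF (v : Int) : Bool := decide (PySem.Int.band v 128 ≠ 0)

def pvMustSetPF (v : Int) : Bool :=
  let num1 := (PySem.List.pyRange 0 8 1).foldl
    (fun num1 n => if PySem.Int.band v ((1 : Int) <<< n.toNat) ≠ 0 then num1 + 1 else num1) (0 : Int)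
  decide (PySem.Int.band num1 1 = 0)

def pvSetFlag (fl : Int) (on : Bool) (flag : Int) : Int :=
  if on then PySem.Int.bor fl flag else PySem.Int.band fl (Int.not flag)

def pvSetFlagsPZS (v : Int) (fl : Int) : Int :=
  let fl := pvSetFlag fl (pvMustSetZF v) pvZF
  let fl := pvSetFlag fl (pvMustSetSF v) pvSF
  let fl := pvSetFlag fl (pvMustSetPF v) pvPF
  fl

-- body of A's "for _ in range(0, cnt)" loop
def pvShlStep (s : Int × Int) (_ : Int) : Int × Int :=
  (pvSetFlag s.1 (decide (PySem.Int.band s.2 128 ≠ 0)) pvCF,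
   PySem.Int.band (s.2 <<< (1:Nat)) 255)

def my_shl (a : Int) (cnt : Int) (initial_flags : Int) : Int × Int :=
  let cnt := PySem.Int.band cnt 31
  if cnt = 0 then (a, initial_flags)
  else
    let new_fl := PySem.Int.band initial_flags (Int.not pvCF)
    let res := a
    let st := (PySem.List.pyRange 0 cnt 1).foldl pvShlStep (new_fl, res)
    let new_fl := st.1
    let res := st.2
    let cf : Int := if PySem.Int.band new_fl pvCF ≠ 0 then 128 else 0
    let new_fl := pvSetFlag new_fl (decide (PySem.Int.bxor (PySem.Int.band res 128) cf ≠ 0)) pvOF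
    let new_fl := pvSetFlagsPZS res new_fl
    (res, new_fl)

-- ===== PORT B =====
def my_shl_alt (a : Int) (cnt : Int) (initial_flags : Int) : Int × Int :=
  let cnt := PySem.Int.band cnt 31
  if cnt = 0 then (a, initial_flags)
  else
    let res := PySem.Int.band (a <<< cnt.toNat) 255
    let cf : Int := if cnt ≤ 8 then PySem.Int.band (a >>> (8 - cnt).toNat) 1 else 0
    let new_fl := pvSetFlag (PySem.Int.band initial_flags (Int.not pvCF)) (decide (cf ≠ 0)) pvCF
    let new_fl := pvSetFlag new_fl (decide (PySem.Int.bxor (PySem.Int.band res 128) (if cf ≠ 0 then 128 else 0) ≠ 0)) pvOF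
    let new_fl := pvSetFlagsPZS res new_fl
    (res, new_fl)

-- ===== PRECONDITION & SPEC =====
def Spec_my_shl (a : Int) (cnt : Int) (initial_flags : Int) (out : Int × Int) : Prop := out = my_shl_alt a cnt initial_flags
instance (a : Int) (cnt : Int) (initial_flags : Int) (out : Int × Int) : Decidable (Spec_my_shl a cnt initial_flags out) := by unfold Spec_my_shl; infer_instance

-- ===== CLAIM (what is proved, stated in full; the proofs are below) =====
def Claim_equal_my_shl : Prop := ∀ (a : Int) (cnt : Int) (initial_flags : Int), Dom_my_shl a cnt initial_flags → Spec_my_shl a cnt initial_flags (my_shl a cnt initial_flags)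

-- ===== LEMMAS AND PROOFS =====

theorem natAnd255 (m : Nat) : m &&& 255 = m % 256 := by
  have := Nat.and_two_pow_sub_one_eq_mod m 8
  norm_num at this; exact this

theorem natAnd31 (m : Nat) : m &&& 31 = m % 32 := by
  have := Nat.and_two_pow_sub_one_eq_mod m 5
  norm_num at this; exact this

theorem natAnd128 (m : Nat) : m &&& 128 = 128 * (m / 128 % 2) := by
  have h := Nat.and_two_pow m 7
  have ht : m.testBit 7 = decide (m / 2 ^ 7 % 2 = 1) := by
    simp [Nat.testBit_eq_decide_div_mod_eq]
  norm_num at h ht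
  have h2 : m / 128 % 2 = 0 ∨ m / 128 % 2 = 1 := by omega
  rcases h2 with h2 | h2 <;> simp [h2] at ht <;> rw [ht] at h <;> simp [h, h2]

theorem natOrOne (m : Nat) : m ||| 1 = m - m % 2 + 1 := by
  apply Nat.eq_of_testBit_eq; intro i
  cases i with
  | zero =>
    simp [Nat.testBit_zero]
    omega
  | succ i =>
    rw [Nat.testBit_or]
    simp only [Nat.testBit_succ]
    have h2 : (m - m % 2 + 1) / 2 = m / 2 := by omega
    rw [h2]
    norm_num [Nat.zero_testBit]

theorem band255 (x : Int) : PySem.Int.band x 255 = x % 256 := by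
  unfold PySem.Int.band
  by_cases h1 : 0 ≤ x
  · rw [if_pos h1, if_pos (by norm_num : (0:Int) ≤ 255),
      show (255:Int).toNat = 255 from rfl, natAnd255]
    omega
  · rw [if_neg h1, if_pos (by norm_num : (0:Int) ≤ 255),
      show (255:Int).toNat = 255 from rfl, Nat.and_comm, natAnd255]
    omega

theorem band31 (x : Int) : PySem.Int.band x 31 = x % 32 := by
  unfold PySem.Int.band
  by_cases h1 : 0 ≤ x
  · rw [if_pos h1, if_pos (by norm_num : (0:Int) ≤ 31),
      show (31:Int).toNat = 31 from rfl, natAnd31]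
    omega
  · rw [if_neg h1, if_pos (by norm_num : (0:Int) ≤ 31),
      show (31:Int).toNat = 31 from rfl, Nat.and_comm, natAnd31]
    omega

theorem band128 (x : Int) : PySem.Int.band x 128 = 128 * (x / 128 % 2) := by
  unfold PySem.Int.band
  by_cases h1 : 0 ≤ x
  · rw [if_pos h1, if_pos (by norm_num : (0:Int) ≤ 128),
      show (128:Int).toNat = 128 from rfl, natAnd128]
    omega
  · rw [if_neg h1, if_pos (by norm_num : (0:Int) ≤ 128),
      show (128:Int).toNat = 128 from rfl, Nat.and_comm, natAnd128]
    omega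

theorem band1' (x : Int) : PySem.Int.band x 1 = x % 2 := by
  rw [PySem.Int.band_one, PySem.Int.mod_eq_emod_of_pos (by norm_num : (0:Int) < 2)]

theorem bandNeg2 (x : Int) : PySem.Int.band x (-2) = x - x % 2 := by
  unfold PySem.Int.band
  by_cases h1 : 0 ≤ x
  · rw [if_pos h1, if_neg (by norm_num : ¬ (0:Int) ≤ -2),
      show (-(-2:Int) - 1).toNat = 1 from rfl, Nat.and_one_is_mod]
    omega
  · rw [if_neg h1, if_neg (by norm_num : ¬ (0:Int) ≤ -2),
      show (-(-2:Int) - 1).toNat = 1 from rfl, natOrOne]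
    omega

theorem bor1 (x : Int) : PySem.Int.bor x 1 = x - x % 2 + 1 := by
  unfold PySem.Int.bor
  by_cases h1 : 0 ≤ x
  · rw [if_pos h1, if_pos (by norm_num : (0:Int) ≤ 1),
      show (1:Int).toNat = 1 from rfl, natOrOne]
    omega
  · rw [if_neg h1, if_pos (by norm_num : (0:Int) ≤ 1),
      show (1:Int).toNat = 1 from rfl, Nat.and_one_is_mod]
    omega

theorem setFlagCF_collapse (fl : Int) (b1 b2 : Bool) :
    pvSetFlag (pvSetFlag fl b1 pvCF) b2 pvCF = pvSetFlag fl b2 pvCF := by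
  cases b1 <;> cases b2 <;>
    simp only [pvSetFlag, pvCF, Bool.false_eq_true, if_false, if_true,
      show Int.not 1 = -2 from rfl, bor1, bandNeg2] <;> omega

theorem readCF (fl : Int) (b : Bool) :
    PySem.Int.band (pvSetFlag fl b pvCF) pvCF = if b then 1 else 0 := by
  cases b <;>
    simp only [pvSetFlag, pvCF, Bool.false_eq_true, if_false, if_true,
      show Int.not 1 = -2 from rfl, bor1, bandNeg2, band1'] <;> omega

theorem shl_loop (n : Nat) (fl0 a : Int) :
    (PySem.List.pyRange 0 ((n : Int) + 1) 1).foldl pvShlStep (fl0, a)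
      = (pvSetFlag fl0 (decide (a * 2 ^ n / 128 % 2 = 1)) pvCF, a * 2 ^ (n + 1) % 256) := by
  induction n generalizing fl0 a with
  | zero =>
    rw [show ((0 : Nat) : Int) + 1 = 0 + 1 by norm_num, PySem.List.pyRange_one_singleton]
    simp only [List.foldl_cons, List.foldl_nil, pvShlStep, Prod.mk.injEq]
    constructor
    · congr 1
      rw [decide_eq_decide, band128, pow_zero, mul_one]
      omega
    · rw [Int.shiftLeft_eq, band255]
  | succ n ih =>
    have hsplit : PySem.List.pyRange 0 ((n + 1 : Nat) : Int) 1 ++ [((n + 1 : Nat) : Int)]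
        = PySem.List.pyRange 0 (((n + 1 : Nat) : Int) + 1) 1 := by
      rw [PySem.List.pyRange_one_succ_right] ; push_cast ; omega
    rw [← hsplit, List.foldl_append]
    rw [show ((n + 1 : Nat) : Int) = (n : Int) + 1 by push_cast; ring] at *
    rw [ih]
    simp only [List.foldl_cons, List.foldl_nil, pvShlStep, setFlagCF_collapse, Prod.mk.injEq]
    constructor
    · congr 1
      rw [decide_eq_decide, band128]
      have h : a * 2 ^ (n + 1) % 256 / 128 % 2 = a * 2 ^ (n + 1) / 128 % 2 := by omega
      rw [h]
      omega
    · rw [Int.shiftLeft_eq, band255]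
      have h2 : a * 2 ^ (n + 1 + 1) = a * 2 ^ (n + 1) * 2 := by ring
      rw [h2]
      omega

theorem my_shl_eq (a cnt fl : Int) : my_shl a cnt fl = my_shl_alt a cnt fl := by
  have hc := band31 cnt
  by_cases h0 : cnt % 32 = 0
  · simp [my_shl, my_shl_alt, hc, h0]
  · have h1 : 0 ≤ cnt % 32 := Int.emod_nonneg cnt (by norm_num)
    have h2 : cnt % 32 < 32 := Int.emod_lt_of_pos cnt (by norm_num)
    obtain ⟨n, hn⟩ : ∃ n : Nat, cnt % 32 = (n : Int) + 1 := ⟨(cnt % 32 - 1).toNat, by omega⟩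
    have hne : ((n : Int) + 1) ≠ 0 := by omega
    have htn : ((n : Int) + 1).toNat = n + 1 := by omega
    -- the two CF conditions agree
    have hcf : (a * 2 ^ n / 128 % 2 = 1) ↔
        ((if ((n : Int) + 1) ≤ 8 then PySem.Int.band (a >>> (8 - ((n : Int) + 1)).toNat) 1 else 0) ≠ 0) := by
      by_cases h8 : ((n : Int) + 1) ≤ 8
      · have hn7 : n ≤ 7 := by omega
        rw [if_pos h8, show (8 - ((n : Int) + 1)).toNat = 7 - n by omega,
          band1', Int.shiftRight_eq_div_pow]
        push_cast
        have hpow : (2 : Int) ^ n * 2 ^ (7 - n) = 128 := by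
          rw [← pow_add, show n + (7 - n) = 7 by omega]
          norm_num
        have heq : a * 2 ^ n / 128 = a / 2 ^ (7 - n) := by
          rw [← hpow, show a * 2 ^ n = 2 ^ n * a by ring,
            Int.mul_ediv_mul_of_pos a (2 ^ (7 - n)) (by positivity)]
        rw [heq]
        omega
      · rw [if_neg h8]
        have hn8 : 8 ≤ n := by omega
        have hsplit : a * 2 ^ n = a * 2 ^ (n - 8) * 2 ^ 8 := by
          rw [mul_assoc, ← pow_add, show n - 8 + 8 = n by omega]
        have heven : a * 2 ^ n / 128 = a * 2 ^ (n - 8) * 2 := by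
          rw [hsplit, show (2:Int) ^ 8 = 256 by norm_num,
            show a * 2 ^ (n - 8) * 256 = (a * 2 ^ (n - 8) * 2) * 128 by ring]
          exact Int.mul_ediv_cancel _ (by norm_num)
        rw [heven]
        omega
    simp only [my_shl, my_shl_alt, hc, hn, if_neg hne, htn, shl_loop]
    have hR : a * 2 ^ (n + 1) % 256 = PySem.Int.band (a <<< (n + 1)) 255 := by
      rw [Int.shiftLeft_eq, band255]
    set cfB : Int := (if ((n : Int) + 1) ≤ 8 then PySem.Int.band (a >>> (8 - ((n : Int) + 1)).toNat) 1 else 0) with hcfB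
    have hb : (decide (a * 2 ^ n / 128 % 2 = 1)) = (decide (cfB ≠ 0)) := by
      rw [decide_eq_decide]; exact hcf
    rw [hb, readCF, ← hR]
    by_cases hq : cfB = 0
    · simp [hq]
    · simp [hq]

-- ===== VERDICT (by name: the statement is the Claim_ definition above) =====
theorem my_shl_spec : Claim_equal_my_shl := by
  intro a cnt fl _
  unfold Spec_my_shl
  exact my_shl_eq a cnt fl
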